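-- pv_equiv track=rewrite | github.com/eoqkrskfk94/coding_practice | baekjoon_problems/1010.py | solve
-- ===== SOURCE A (Python) =====
-- def solve(N,M):
--   dp = [[0] * M for i in range(M)]
--
--   for i in range(M):
--     for j in range(M):
--       if i == j:
--         dp[i][j] = 1
--       elif i == 0:
--         dp[i][j] = j+1
--       elif i > j:
--         dp[i][j] = 0
--       else:
--         dp[i][j] = dp[i-1][j-1] + dp[i][j-1]
--
--
--   return dp
-- ===== SOURCE B (Python) =====
-- def solve(N, M):
--     table = []
--     for i in range(M):
--         row = []
--         c = 0
--         for j in range(M):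
--             if j < i:
--                 row.append(0)
--             elif j == i:
--                 c = 1
--                 row.append(c)
--             else:
--                 c = c * (j + 1) // (j - i)
--                 row.append(c)
--         table.append(row)
--     return table
-- ===== Notes on version B (the rewrite author's own statement) =====
-- stated objective: alternative
-- what changed: Replaced the 2D Pascal-recurrence table fill (each cell written into a preallocated MxM table as the sum of its left and upper-left neighbours) by building each row independently with the closed-form multiplicative rule for binomial coefficients C(j+1,i+1) = C(j,i+1)*(j+1)//(j-i), keeping only one running value per row and no table reads.
import Mathlib
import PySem

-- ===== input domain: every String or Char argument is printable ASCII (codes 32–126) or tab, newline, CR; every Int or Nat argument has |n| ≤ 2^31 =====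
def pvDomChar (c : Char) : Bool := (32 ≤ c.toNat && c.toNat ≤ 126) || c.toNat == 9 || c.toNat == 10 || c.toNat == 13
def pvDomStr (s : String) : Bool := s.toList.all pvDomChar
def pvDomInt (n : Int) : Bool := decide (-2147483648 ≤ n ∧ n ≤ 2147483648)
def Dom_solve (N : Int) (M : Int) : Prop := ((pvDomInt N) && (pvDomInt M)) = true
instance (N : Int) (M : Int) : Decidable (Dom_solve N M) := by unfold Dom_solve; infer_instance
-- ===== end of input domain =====

-- B replaces A's in-place Pascal-style DP fill by an independent closed-form value per cell
-- (the binomial coefficient C(j+1, i+1), computed multiplicatively); objective: simpler.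

-- ===== PORT A =====
-- literal port of A: dp = [[0]*M for i in range(M)]; two nested loops over range(M) updating dp in place.
-- dp[i-1][j-1] / dp[i][j-1] are ported with pyGetD (defaults [] / 0): in the branch where A reads them
-- (0 < i < j < M) the indices are always in range, so the defaults are never used and the port is exact.
def solve (N : Int) (M : Int) : List (List Int) :=
  let dp : List (List Int) := (PySem.List.pyRange 0 M 1).map (fun _ => PySem.List.pyRepeat [(0 : Int)] M)
  (PySem.List.pyRange 0 M 1).foldl (fun dp i =>
    (PySem.List.pyRange 0 M 1).foldl (fun dp j =>
      PySem.List.pySetD dp i (PySem.List.pySetD (PySem.List.pyGetD dp i []) j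
        (if i = j then 1
         else if i = 0 then j + 1
         else if i > j then 0
         else PySem.List.pyGetD (PySem.List.pyGetD dp (i - 1) []) (j - 1) 0
              + PySem.List.pyGetD (PySem.List.pyGetD dp i []) (j - 1) 0))) dp) dp

-- ===== PORT B =====
-- literal port of Source B: each row is generated independently, left to right, with a single running
-- value c updated by the multiplicative rule c = c * (j + 1) // (j - i); rows are appended to table.
-- (the two Python variables row and c are the two components of the fold's pair accumulator)
def solve_alt (N : Int) (M : Int) : List (List Int) :=
  (PySem.List.pyRange 0 M 1).foldl (fun table i =>
    table ++ [((PySem.List.pyRange 0 M 1).foldl (fun (rc : List Int × Int) j =>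
      if j < i then (rc.1 ++ [(0 : Int)], rc.2)
      else if j = i then (rc.1 ++ [(1 : Int)], 1)
      else
        let c := PySem.Int.floordiv (rc.2 * (j + 1)) (j - i)
        (rc.1 ++ [c], c)) ([], 0)).1]) []

-- ===== PRECONDITION & SPEC =====
def Spec_solve (N : Int) (M : Int) (out : List (List Int)) : Prop := out = solve_alt N M
instance (N : Int) (M : Int) (out : List (List Int)) : Decidable (Spec_solve N M out) := by unfold Spec_solve; infer_instance

-- ===== CLAIM (what is proved, stated in full; the proofs are below) =====
def Claim_equal_solve : Prop := ∀ (N : Int) (M : Int), Dom_solve N M → Spec_solve N M (solve N M)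

-- ===== LEMMAS AND PROOFS =====

-- the common target table: cell (i, j) is C(j+1, i+1)
def pvTbl (m : Nat) : List (List Int) :=
  (List.range m).map (fun i => (List.range m).map (fun j => ((j + 1).choose (i + 1) : Int)))

-- intermediate state of A's fill: rows < i final, row i final up to column k, rest zero
def pvSt (m i k : Nat) : List (List Int) :=
  (List.range m).map (fun r =>
    if r < i then (List.range m).map (fun j => ((j + 1).choose (r + 1) : Int))
    else if r = i then (List.range m).map (fun j => if j < k then ((j + 1).choose (i + 1) : Int) else 0)
    else (List.range m).map (fun _ => (0 : Int)))

-- the multiplicative rule is exact: C(t,i+1)*(t+1) = C(t+1,i+1)*(t-i) for i < t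
theorem pv_choose_mul (t i : Nat) (hti : i < t) :
    ((t.choose (i + 1) : Nat) : Int) * ((t : Int) + 1)
      = (((t + 1).choose (i + 1) : Nat) : Int) * ((t : Int) - (i : Int)) := by
  have hp : (((t + 1).choose (i + 1) : Nat) : Int)
      = ((t.choose i : Nat) : Int) + ((t.choose (i + 1) : Nat) : Int) := by
    exact_mod_cast Nat.choose_succ_succ t i
  have hs : ((t - i : Nat) : Int) = (t : Int) - (i : Int) := by
    rw [Nat.cast_sub (le_of_lt hti)]
  have hr : ((t.choose (i + 1) : Nat) : Int) * ((i : Int) + 1)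
      = ((t.choose i : Nat) : Int) * ((t : Int) - (i : Int)) := by
    rw [← hs]
    exact_mod_cast Nat.choose_succ_right_eq t i
  linear_combination ((i : Int) - (t : Int)) * hp + hr

-- invariant of B's inner loop: after t steps, row holds the first t cells of row i
-- and the running value c is C(t, i+1) once the diagonal has been passed
theorem row_fold (i t : Nat) :
    (List.range t).foldl (fun (rc : List Int × Int) (j : Nat) =>
      if (j : Int) < (i : Int) then (rc.1 ++ [(0 : Int)], rc.2)
      else if (j : Int) = (i : Int) then (rc.1 ++ [(1 : Int)], 1)
      else (rc.1 ++ [PySem.Int.floordiv (rc.2 * ((j : Int) + 1)) ((j : Int) - (i : Int))],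
            PySem.Int.floordiv (rc.2 * ((j : Int) + 1)) ((j : Int) - (i : Int)))) ([], 0)
    = ((List.range t).map (fun j => (((j + 1).choose (i + 1) : Nat) : Int)),
       if t ≤ i then 0 else ((t.choose (i + 1) : Nat) : Int)) := by
  induction t with
  | zero => simp
  | succ t ih =>
    rw [List.range_succ, List.foldl_append, ih]
    simp only [List.foldl, List.map_append, List.map_cons, List.map_nil]
    by_cases h1 : t < i
    · rw [if_pos (by exact_mod_cast h1)]
      rw [if_pos h1.le, if_pos (by omega : t + 1 ≤ i),
          Nat.choose_eq_zero_of_lt (by omega : t + 1 < i + 1)]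
      simp
    · rw [if_neg (by exact_mod_cast h1)]
      by_cases h2 : t = i
      · subst h2
        rw [if_pos rfl, if_neg (by omega : ¬ t + 1 ≤ t), Nat.choose_self]
        simp
      · have hti : i < t := by omega
        rw [if_neg (by exact_mod_cast h2), if_neg (by omega : ¬ t ≤ i),
            if_neg (by omega : ¬ t + 1 ≤ i)]
        have hc : PySem.Int.floordiv (((t.choose (i + 1) : Nat) : Int) * ((t : Int) + 1))
            ((t : Int) - (i : Int)) = (((t + 1).choose (i + 1) : Nat) : Int) := by
          rw [pv_choose_mul t i hti,
              PySem.Int.floordiv_eq_ediv_of_pos (by omega : (0 : Int) < (t : Int) - (i : Int))]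
          exact Int.mul_ediv_cancel _ (by omega)
        simp only [hc]

theorem solve_alt_eq_tbl (N M : Int) : solve_alt N M = pvTbl M.toNat := by
  unfold solve_alt pvTbl
  rw [PySem.List.pyRange_one 0 M]
  simp only [sub_zero, zero_add, List.foldl_map]
  rw [PySem.List.foldl_append_singleton_eq_map]
  rw [List.nil_append]
  refine List.map_congr_left (fun i _ => ?_)
  rw [row_fold i M.toNat]

-- setting an element of a map-over-range
theorem set_map_range {α : Type} (m i : Nat) (f : Nat → α) (v : α) :
    ((List.range m).map f).set i v = (List.range m).map (fun r => if r = i then v else f r) := by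
  apply List.ext_getElem
  · simp
  · intro p h1 h2
    simp only [List.getElem_set, List.getElem_map, List.getElem_range]
    by_cases hp : p = i <;> simp [hp, Ne.symm]

-- reading a row of a map-over-range
theorem getD_map_range' (m i : Nat) (hi : i < m) (f : Nat → List Int) :
    PySem.List.pyGetD ((List.range m).map f) (i : Int) [] = f i := by
  rw [PySem.List.pyGetD_natCast]
  simp [List.getD, hi]

theorem getD_map_range_int (m i : Nat) (hi : i < m) (f : Nat → Int) :
    PySem.List.pyGetD ((List.range m).map f) (i : Int) 0 = f i := by
  rw [PySem.List.pyGetD_natCast]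
  simp [List.getD, hi]

theorem zero_row (m : Nat) : (List.range m).map (fun _ => (0 : Int)) = List.replicate m 0 := by
  simp [List.map_const']

-- one inner step of A: writing cell (i, k) moves pvSt m i k to pvSt m i (k+1)
theorem inner_step (m i k : Nat) (hi : i < m) (hk : k < m) :
    PySem.List.pySetD (pvSt m i k) (i : Int)
      (PySem.List.pySetD (PySem.List.pyGetD (pvSt m i k) (i : Int) []) (k : Int)
        (if (i : Int) = (k : Int) then 1
         else if (i : Int) = 0 then (k : Int) + 1
         else if (i : Int) > (k : Int) then 0
         else PySem.List.pyGetD (PySem.List.pyGetD (pvSt m i k) ((i : Int) - 1) []) ((k : Int) - 1) 0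
              + PySem.List.pyGetD (PySem.List.pyGetD (pvSt m i k) (i : Int) []) ((k : Int) - 1) 0))
      = pvSt m i (k + 1) := by
  have hrowi : PySem.List.pyGetD (pvSt m i k) (i : Int) []
      = (List.range m).map (fun j => if j < k then ((j + 1).choose (i + 1) : Int) else 0) := by
    unfold pvSt
    rw [getD_map_range' m i hi]
    simp
  have hval :
      (if (i : Int) = (k : Int) then 1
       else if (i : Int) = 0 then (k : Int) + 1
       else if (i : Int) > (k : Int) then 0
       else PySem.List.pyGetD (PySem.List.pyGetD (pvSt m i k) ((i : Int) - 1) []) ((k : Int) - 1) 0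
            + PySem.List.pyGetD (PySem.List.pyGetD (pvSt m i k) (i : Int) []) ((k : Int) - 1) 0)
      = ((k + 1).choose (i + 1) : Int) := by
    by_cases hik : i = k
    · subst hik; simp
    · rw [if_neg (by exact_mod_cast hik)]
      by_cases hi0 : i = 0
      · subst hi0
        simp [Nat.choose_one_right]
      · rw [if_neg (by exact_mod_cast hi0)]
        by_cases hgt : k < i
        · rw [if_pos (by exact_mod_cast hgt)]
          rw [Nat.choose_eq_zero_of_lt (by omega)]
          simp
        · rw [if_neg (by exact_mod_cast hgt)]
          push_neg at hgt
          have hik' : i < k := lt_of_le_of_ne hgt hik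
          have hipos : 1 ≤ i := Nat.one_le_iff_ne_zero.mpr hi0
          have e1 : (i : Int) - 1 = ((i - 1 : Nat) : Int) := by rw [Nat.cast_sub hipos]; ring
          have e2 : (k : Int) - 1 = ((k - 1 : Nat) : Int) := by
            rw [Nat.cast_sub (by omega : 1 ≤ k)]; ring
          rw [e1, e2, hrowi]
          have hprev : PySem.List.pyGetD (pvSt m i k) ((i - 1 : Nat) : Int) []
              = (List.range m).map (fun j => ((j + 1).choose (i - 1 + 1) : Int)) := by
            unfold pvSt
            rw [getD_map_range' m (i - 1) (by omega)]
            simp [show i - 1 < i by omega]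
          rw [hprev, getD_map_range_int m (k - 1) (by omega),
              getD_map_range_int m (k - 1) (by omega)]
          rw [if_pos (by omega : k - 1 < k),
              show k - 1 + 1 = k by omega, show i - 1 + 1 = i by omega,
              show (k + 1).choose (i + 1) = k.choose i + k.choose (i + 1) from Nat.choose_succ_succ k i]
          push_cast; ring
  rw [hval, hrowi, PySem.List.pySetD_natCast, PySem.List.pySetD_natCast, set_map_range m k]
  conv_lhs => rw [pvSt]
  rw [set_map_range m i]
  conv_rhs => rw [pvSt]
  refine List.map_congr_left (fun r hr => ?_)
  by_cases hri : r = i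
  · subst hri
    rw [if_pos rfl, if_neg (lt_irrefl r), if_pos rfl]
    refine List.map_congr_left (fun j hj => ?_)
    by_cases hjk : j = k
    · subst hjk; simp
    · rw [if_neg hjk]
      by_cases h1 : j < k
      · rw [if_pos h1, if_pos (by omega)]
      · rw [if_neg h1, if_neg (by omega)]
  · rw [if_neg hri]
    by_cases h1 : r < i
    · rw [if_pos h1, if_pos h1]
    · rw [if_neg h1, if_neg h1, if_neg hri, if_neg hri]

-- A's inner loop, processed through column k, starting from pvSt m i 0
theorem inner_fold (m i : Nat) (hi : i < m) (k : Nat) (hk : k ≤ m) :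
    (List.range k).foldl (fun dp (j : Nat) =>
      PySem.List.pySetD dp (i : Int)
        (PySem.List.pySetD (PySem.List.pyGetD dp (i : Int) []) (j : Int)
          (if (i : Int) = (j : Int) then 1
           else if (i : Int) = 0 then (j : Int) + 1
           else if (i : Int) > (j : Int) then 0
           else PySem.List.pyGetD (PySem.List.pyGetD dp ((i : Int) - 1) []) ((j : Int) - 1) 0
                + PySem.List.pyGetD (PySem.List.pyGetD dp (i : Int) []) ((j : Int) - 1) 0)))
      (pvSt m i 0) = pvSt m i k := by
  induction k with
  | zero => simp
  | succ k ih =>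
    rw [List.range_succ, List.foldl_append, ih (by omega)]
    simp only [List.foldl]
    exact inner_step m i k hi (by omega)

-- a finished row i equals the starting state for row i+1
theorem st_shift (m i : Nat) : pvSt m i m = pvSt m (i + 1) 0 := by
  unfold pvSt
  refine List.map_congr_left (fun r hr => ?_)
  have hrm : r < m := List.mem_range.mp hr
  by_cases h1 : r < i
  · rw [if_pos h1, if_pos (by omega)]
  · rw [if_neg h1]
    by_cases h2 : r = i
    · subst h2
      rw [if_pos rfl, if_pos (by omega)]
      refine List.map_congr_left (fun j hj => ?_)
      rw [if_pos (List.mem_range.mp hj)]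
    · rw [if_neg h2, if_neg (by omega : ¬ r < i + 1)]
      by_cases h3 : r = i + 1
      · subst h3
        rw [if_pos rfl]
        refine List.map_congr_left (fun j hj => ?_)
        rw [if_neg (by omega)]
      · rw [if_neg h3]

theorem st_final (m : Nat) : pvSt m m 0 = pvTbl m := by
  unfold pvSt pvTbl
  refine List.map_congr_left (fun r hr => ?_)
  rw [if_pos (List.mem_range.mp hr)]

-- A's outer loop through row i
theorem outer_fold (m : Nat) (i : Nat) (hi : i ≤ m) :
    (List.range i).foldl (fun dp (r : Nat) =>
      (List.range m).foldl (fun dp (j : Nat) =>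
        PySem.List.pySetD dp (r : Int)
          (PySem.List.pySetD (PySem.List.pyGetD dp (r : Int) []) (j : Int)
            (if (r : Int) = (j : Int) then 1
             else if (r : Int) = 0 then (j : Int) + 1
             else if (r : Int) > (j : Int) then 0
             else PySem.List.pyGetD (PySem.List.pyGetD dp ((r : Int) - 1) []) ((j : Int) - 1) 0
                  + PySem.List.pyGetD (PySem.List.pyGetD dp (r : Int) []) ((j : Int) - 1) 0))) dp)
      (pvSt m 0 0) = pvSt m i 0 := by
  induction i with
  | zero => simp
  | succ i ih =>
    rw [List.range_succ, List.foldl_append, ih (by omega)]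
    simp only [List.foldl]
    rw [inner_fold m i (by omega) m le_rfl, st_shift]

theorem solve_eq_tbl (N M : Int) : solve N M = pvTbl M.toNat := by
  unfold solve
  simp only [PySem.List.pyRange_one 0 M, sub_zero, zero_add, List.foldl_map, List.map_map]
  have hinit : (List.range M.toNat).map
      ((fun _ => PySem.List.pyRepeat [(0 : Int)] M) ∘ (fun k : Nat => (k : Int)))
      = pvSt M.toNat 0 0 := by
    unfold pvSt
    refine List.map_congr_left (fun r hr => ?_)
    simp only [Function.comp_apply, PySem.List.pyRepeat_singleton]
    by_cases h0 : r = 0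
    · subst h0
      rw [if_neg (by omega), if_pos rfl,
          show (fun j : Nat => if j < 0 then (((j + 1).choose (0 + 1) : Nat) : Int) else 0)
            = (fun _ : Nat => (0 : Int)) from funext (fun j => by rw [if_neg (by omega)]),
          zero_row]
    · rw [if_neg (by omega), if_neg h0, zero_row]
  rw [hinit, ← st_final M.toNat]
  exact outer_fold M.toNat M.toNat le_rfl

-- ===== VERDICT (by name: the statement is the Claim_ definition above) =====
theorem solve_spec : Claim_equal_solve := by
  intro N M _
  unfold Spec_solve
  rw [solve_eq_tbl, solve_alt_eq_tbl]
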